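-- pv_equiv track=rewrite | github.com/dmarek03/ALGORITHM_AND_DATA_STRUCTURE | colloquiums/col_2022_2023/kolu/kolu.py | ice_cream_2
-- ===== SOURCE A (Python) =====
-- def max_heapify(arr, n, i):
--     largest = i  # Initialize largest as root
--     left = 2 * i + 1  # left = 2*i + 1
--     right = 2 * i + 2  # right = 2*i + 2
--
--     # See if left child of root exists and is greater than root
--     if left < n and arr[left] > arr[largest]:
--         largest = left
--
--     # See if right child of root exists and is greater than root
--     if right < n and arr[right] > arr[largest]:
--         largest = right
--
--     # Change root, if needed
--     if largest != i:
--         arr[i], arr[largest] = arr[largest], arr[i]  # swap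
--
--         # Heapify the root.
--         max_heapify(arr, n, largest)
--
-- def build_max_heap(arr):
--     n = len(arr)
--     # Build a maxheap.
--     for i in range(n // 2 - 1, -1, -1):
--         max_heapify(arr, n, i)
--
-- def heap_extract_max(arr):
--     n = len(arr)
--     if n == 0:
--         return 0
--     # Move max to end
--     arr[0], arr[n-1] = arr[n-1], arr[0]
--     max_value = arr.pop()  # Remove the last element
--     # Heapify the root
--     max_heapify(arr, len(arr), 0)
--     return max_value
--
-- def ice_cream_2(T):
--     # Convert array to max heap
--     build_max_heap(T)
--
--     max_volume = 0
--     minute = 0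
--
--     while T:
--         # Extract the maximum element (max heap root)
--         current_max = heap_extract_max(T)
--
--         if current_max > minute:
--             # We can only eat the remaining ice cream before it melts
--             max_volume += current_max - minute
--             minute += 1  # Move to the next minute
--
--     return max_volume
-- ===== SOURCE B (Python) =====
-- def ice_cream_2(T):
--     # Sort ascending in place (so T is mutated like A's heap version), then
--     # repeatedly pop the largest remaining value off the end.
--     T.sort()
--     max_volume = 0
--     minute = 0
--     while T:
--         current = T.pop()
--         if current > minute:
--             max_volume += current - minute
--             minute += 1
--     return max_volume
-- ===== Notes on version B (the rewrite author's own statement) =====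
-- stated objective: simpler
-- what changed: Replaces the hand-written max-heap (build_max_heap + repeated heap_extract_max/max_heapify) with one in-place ascending sort followed by popping the largest element off the end each iteration; the argument list is still emptied in place.
import Mathlib
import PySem

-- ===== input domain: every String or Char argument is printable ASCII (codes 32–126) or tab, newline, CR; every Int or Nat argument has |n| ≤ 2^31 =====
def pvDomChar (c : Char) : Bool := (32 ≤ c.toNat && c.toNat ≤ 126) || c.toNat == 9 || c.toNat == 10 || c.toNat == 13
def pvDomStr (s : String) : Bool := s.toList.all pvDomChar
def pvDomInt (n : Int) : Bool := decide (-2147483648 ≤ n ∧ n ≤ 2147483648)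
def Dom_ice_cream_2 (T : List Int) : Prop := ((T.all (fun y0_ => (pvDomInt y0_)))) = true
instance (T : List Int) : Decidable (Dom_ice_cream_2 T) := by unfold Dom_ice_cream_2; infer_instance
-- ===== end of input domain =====

-- B replaces A's hand-written max-heap extraction with one in-place ascending sort plus
-- popping the largest element off the end (objective: simpler).  Both A and B mutate and
-- empty their Python argument; the equivalence proved here is about the return value only.

-- ===== PORT A =====
-- arr[i], arr[largest] = arr[largest], arr[i]  (indices always in range when executed)
def pvSwap (l : List Int) (i j : Nat) : List Int :=
  (l.set i (l.getD j 0)).set j (l.getD i 0)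

-- the two `if` statements of max_heapify selecting the largest of root/left/right
def pvLargest (arr : List Int) (n i : Nat) : Nat :=
  let left := 2*i + 1
  let right := 2*i + 2
  let largest := if left < n ∧ arr.getD left 0 > arr.getD i 0 then left else i
  if right < n ∧ arr.getD right 0 > arr.getD largest 0 then right else largest

-- max_heapify(arr, n, i); fuel only makes the recursion total (callers pass enough fuel)
def maxHeapify : Nat → List Int → Nat → Nat → List Int
  | 0, arr, _, _ => arr
  | fuel+1, arr, n, i =>
    let largest := pvLargest arr n i
    if largest ≠ i then maxHeapify fuel (pvSwap arr i largest) n largest else arr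

-- build_max_heap(arr): for i in range(n//2 - 1, -1, -1): max_heapify(arr, n, i)
def buildMaxHeap (arr : List Int) : List Int :=
  let n := arr.length
  (List.range (n / 2)).reverse.foldl (fun a i => maxHeapify n a n i) arr

-- heap_extract_max(arr): returns (max_value, remaining array)
def heapExtractMax (arr : List Int) : Int × List Int :=
  let n := arr.length
  if n = 0 then (0, arr)
  else
    let a1 := pvSwap arr 0 (n - 1)
    let maxValue := a1.getD (n - 1) 0
    let a2 := a1.dropLast
    (maxValue, maxHeapify a2.length a2 a2.length 0)

-- while T: ...  (fuel = initial length; each step removes one element)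
def iceLoop : Nat → List Int → Int → Int → Int
  | 0, _, maxV, _ => maxV
  | fuel+1, T, maxV, minute =>
    if T.isEmpty then maxV
    else
      let p := heapExtractMax T
      if p.1 > minute then iceLoop fuel p.2 (maxV + (p.1 - minute)) (minute + 1)
      else iceLoop fuel p.2 maxV minute

def ice_cream_2 (T : List Int) : Int :=
  let arr := buildMaxHeap T
  iceLoop arr.length arr 0 0

-- ===== PORT B =====
-- while T: current = T.pop(); ...  (pop from the back of the ascending-sorted list)
def altLoop : Nat → List Int → Int → Int → Int
  | 0, _, maxV, _ => maxV
  | fuel+1, T, maxV, minute =>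
    if T.isEmpty then maxV
    else
      let current := T.getD (T.length - 1) 0
      let T' := T.dropLast
      if current > minute then altLoop fuel T' (maxV + (current - minute)) (minute + 1)
      else altLoop fuel T' maxV minute

def ice_cream_2_alt (T : List Int) : Int :=
  let S := PySem.List.sorted T (fun x => x) false
  altLoop S.length S 0 0

-- ===== PRECONDITION & SPEC =====
def Spec_ice_cream_2 (T : List Int) (out : Int) : Prop := out = ice_cream_2_alt T
instance (T : List Int) (out : Int) : Decidable (Spec_ice_cream_2 T out) := by unfold Spec_ice_cream_2; infer_instance

-- ===== CLAIM (what is proved, stated in full; the proofs are below) =====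
def Claim_equal_ice_cream_2 : Prop := ∀ (T : List Int), Dom_ice_cream_2 T → Spec_ice_cream_2 T (ice_cream_2 T)

-- ===== LEMMAS AND PROOFS =====

-- the common meaning of both loops: eat the values in descending order
def eat : List Int → Int → Int → Int
  | [], maxV, _ => maxV
  | c :: rest, maxV, minute =>
    if c > minute then eat rest (maxV + (c - minute)) (minute + 1)
    else eat rest maxV minute

-- j is a node of the subtree rooted at i (heap index arithmetic)
def isDesc (i j : Nat) : Prop :=
  j = i ∨ (if _h : 0 < j then isDesc i ((j - 1) / 2) else False)
termination_by j
decreasing_by omega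

theorem isDesc_iff (i j : Nat) : isDesc i j ↔ j = i ∨ (0 < j ∧ isDesc i ((j - 1) / 2)) := by
  rw [isDesc.eq_def]
  by_cases h : 0 < j <;> simp [h]

theorem isDesc_self (i : Nat) : isDesc i i := by rw [isDesc_iff]; left; rfl

theorem isDesc_le {i j : Nat} (h : isDesc i j) : i ≤ j := by
  induction j using Nat.strong_induction_on with
  | _ j ih =>
    rw [isDesc_iff] at h
    rcases h with h | ⟨h0, h⟩
    · omega
    · have := ih _ (by omega : (j - 1) / 2 < j) h; omega

theorem isDesc_zero (j : Nat) : isDesc 0 j := by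
  induction j using Nat.strong_induction_on with
  | _ j ih =>
    rw [isDesc_iff]
    by_cases h : j = 0
    · left; exact h
    · right; exact ⟨by omega, ih _ (by omega)⟩

theorem isDesc_child {i p j : Nat} (h : isDesc i p) (hp : p = (j - 1) / 2) (hj : 0 < j) :
    isDesc i j := by
  rw [isDesc_iff]; right; exact ⟨hj, hp ▸ h⟩

theorem isDesc_child_left (i : Nat) : isDesc i (2*i + 1) :=
  isDesc_child (isDesc_self i) (by omega) (by omega)

theorem isDesc_child_right (i : Nat) : isDesc i (2*i + 2) :=
  isDesc_child (isDesc_self i) (by omega) (by omega)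

theorem isDesc_trans {i p j : Nat} (h1 : isDesc i p) (h2 : isDesc p j) : isDesc i j := by
  induction j using Nat.strong_induction_on with
  | _ j ih =>
    rw [isDesc_iff] at h2
    rcases h2 with rfl | ⟨h0, h2⟩
    · exact h1
    · exact isDesc_child (ih _ (by omega) h2) rfl h0

-- parent of a proper member of the subtree of i is in the subtree of i
theorem isDesc_parent {i j : Nat} (h : isDesc i j) (hne : j ≠ i) :
    0 < j ∧ isDesc i ((j - 1) / 2) := by
  rw [isDesc_iff] at h
  rcases h with rfl | h
  · exact absurd rfl hne
  · exact h

-- edges of the subtree rooted at t all satisfied / all except those leaving t itself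
def EdgesOk (arr : List Int) (n t : Nat) : Prop :=
  ∀ j, 0 < j → j < n → isDesc t ((j - 1) / 2) → arr.getD j 0 ≤ arr.getD ((j - 1) / 2) 0

def AlmostSub (arr : List Int) (n t : Nat) : Prop :=
  ∀ j, 0 < j → j < n → isDesc t ((j - 1) / 2) → (j - 1) / 2 ≠ t →
    arr.getD j 0 ≤ arr.getD ((j - 1) / 2) 0

theorem sub_max {arr : List Int} {n t : Nat} (h : EdgesOk arr n t) :
    ∀ j, j < n → isDesc t j → arr.getD j 0 ≤ arr.getD t 0 := by
  intro j
  induction j using Nat.strong_induction_on with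
  | _ j ih =>
    intro hj hd
    rw [isDesc_iff] at hd
    rcases hd with rfl | ⟨h0, hd⟩
    · exact le_refl _
    · calc arr.getD j 0 ≤ arr.getD ((j - 1) / 2) 0 := h j h0 hj hd
        _ ≤ arr.getD t 0 := ih _ (by omega) (by omega) hd

-- getD / set bookkeeping
theorem getD_set_self {l : List Int} {i : Nat} {a d : Int} (h : i < l.length) :
    (l.set i a).getD i d = a := by
  simp [List.getD_eq_getElem?_getD, List.getElem?_set_self, h]

theorem getD_set_ne {l : List Int} {i j : Nat} {a d : Int} (h : i ≠ j) :
    (l.set i a).getD j d = l.getD j d := by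
  simp [List.getD_eq_getElem?_getD, List.getElem?_set_ne h]

theorem pvSwap_length (l : List Int) (i j : Nat) : (pvSwap l i j).length = l.length := by
  unfold pvSwap
  rw [List.length_set, List.length_set]

theorem pvSwap_getD_fst {l : List Int} {i j : Nat} (hi : i < l.length) (hj : j < l.length) :
    (pvSwap l i j).getD i 0 = l.getD j 0 := by
  unfold pvSwap
  by_cases h : j = i
  · subst h; rw [getD_set_self (by simpa using hi)]
  · rw [getD_set_ne h, getD_set_self hi]

theorem pvSwap_getD_snd {l : List Int} {i j : Nat} (hi : i < l.length) (hj : j < l.length) :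
    (pvSwap l i j).getD j 0 = l.getD i 0 := by
  unfold pvSwap
  rw [getD_set_self (by simpa using hj)]

theorem pvSwap_getD_other {l : List Int} {i j k : Nat} (h1 : k ≠ i) (h2 : k ≠ j) :
    (pvSwap l i j).getD k 0 = l.getD k 0 := by
  unfold pvSwap
  rw [getD_set_ne (Ne.symm h2), getD_set_ne (Ne.symm h1)]

theorem cons_set_perm : ∀ (t : List Int) (m : Nat) (x : Int), m < t.length →
    (t.getD m 0 :: t.set m x).Perm (x :: t) := by
  intro t
  induction t with
  | nil => intro m x h; simp at h
  | cons y s ih =>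
    intro m x h
    cases m with
    | zero => simpa using List.Perm.swap x y s
    | succ m =>
      have h' : m < s.length := by simpa using h
      exact (List.Perm.swap _ _ _).trans
        ((List.Perm.cons y (ih m x h')).trans (List.Perm.swap _ _ _))

theorem pvSwap_perm {l : List Int} {i j : Nat} (hi : i < l.length) (hj : j < l.length) :
    (pvSwap l i j).Perm l := by
  induction l generalizing i j with
  | nil => simp at hi
  | cons x t ih =>
    cases i with
    | zero =>
      cases j with
      | zero => simp [pvSwap, getD_set_self]
      | succ m =>
        have hm : m < t.length := by simpa using hj
        have : pvSwap (x :: t) 0 (m+1) = t.getD m 0 :: t.set m x := by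
          simp [pvSwap]
        rw [this]
        exact cons_set_perm t m x hm
    | succ a =>
      cases j with
      | zero =>
        have ha : a < t.length := by simpa using hi
        have : pvSwap (x :: t) (a+1) 0 = t.getD a 0 :: t.set a x := by
          simp [pvSwap]
        rw [this]
        exact cons_set_perm t a x ha
      | succ b =>
        have : pvSwap (x :: t) (a+1) (b+1) = x :: pvSwap t a b := by
          simp [pvSwap]
        rw [this]
        exact List.Perm.cons x (ih (by simpa using hi) (by simpa using hj))

-- what pvLargest guarantees
theorem pvLargest_spec (arr : List Int) (n i : Nat) :
    (pvLargest arr n i = i ∨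
      ((pvLargest arr n i = 2*i + 1 ∨ pvLargest arr n i = 2*i + 2) ∧ pvLargest arr n i < n ∧
        arr.getD i 0 < arr.getD (pvLargest arr n i) 0)) ∧
    (∀ c, (c = 2*i + 1 ∨ c = 2*i + 2) → c < n → arr.getD c 0 ≤ arr.getD (pvLargest arr n i) 0) ∧
    arr.getD i 0 ≤ arr.getD (pvLargest arr n i) 0 := by
  simp only [pvLargest]
  split_ifs with h1 h2 h2
  · exact ⟨Or.inr ⟨Or.inr rfl, h2.1, by omega⟩,
      by intro c hc hcn; rcases hc with rfl | rfl <;> omega, by omega⟩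
  · exact ⟨Or.inr ⟨Or.inl rfl, h1.1, by omega⟩,
      by intro c hc hcn; rcases hc with rfl | rfl <;> omega, by omega⟩
  · exact ⟨Or.inr ⟨Or.inr rfl, h2.1, by omega⟩,
      by intro c hc hcn; rcases hc with rfl | rfl <;> omega, by omega⟩
  · exact ⟨Or.inl rfl,
      by intro c hc hcn; rcases hc with rfl | rfl <;> omega, by omega⟩

-- main heapify lemmas
theorem maxHeapify_length : ∀ (fuel : Nat) (arr : List Int) (n i : Nat),
    (maxHeapify fuel arr n i).length = arr.length := by
  intro fuel
  induction fuel with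
  | zero => intro arr n i; rfl
  | succ fuel ih =>
    intro arr n i
    rw [maxHeapify]
    split
    · rw [ih, pvSwap_length]
    · rfl

theorem maxHeapify_perm : ∀ (fuel : Nat) (arr : List Int) (n i : Nat), n ≤ arr.length →
    (maxHeapify fuel arr n i).Perm arr := by
  intro fuel
  induction fuel with
  | zero => intro arr n i _; exact List.Perm.refl arr
  | succ fuel ih =>
    intro arr n i hn
    rw [maxHeapify]
    split
    · rename_i hne
      obtain ⟨hsel, _, _⟩ := pvLargest_spec arr n i
      rcases hsel with h | ⟨_, hLn, _⟩
      · exact absurd h hne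
      · have hiL : i < pvLargest arr n i := by
          have := isDesc_le (show isDesc i (pvLargest arr n i) by
            rcases ‹pvLargest arr n i = 2*i+1 ∨ pvLargest arr n i = 2*i+2› with h | h
            · rw [h]; exact isDesc_child_left i
            · rw [h]; exact isDesc_child_right i)
          omega
        have h1 : (pvSwap arr i (pvLargest arr n i)).Perm arr :=
          pvSwap_perm (by omega) (by omega)
        exact (ih _ n _ (by rw [pvSwap_length]; exact hn)).trans h1
    · exact List.Perm.refl arr

theorem maxHeapify_outside : ∀ (fuel : Nat) (arr : List Int) (n i k : Nat),
    ¬ isDesc i k → (maxHeapify fuel arr n i).getD k 0 = arr.getD k 0 := by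
  intro fuel
  induction fuel with
  | zero => intro arr n i k _; rfl
  | succ fuel ih =>
    intro arr n i k hk
    rw [maxHeapify]
    split
    · rename_i hne
      obtain ⟨hsel, _, _⟩ := pvLargest_spec arr n i
      rcases hsel with h | ⟨hc, hLn, _⟩
      · exact absurd h hne
      · have hdL : isDesc i (pvLargest arr n i) := by
          rcases hc with h | h
          · rw [h]; exact isDesc_child_left i
          · rw [h]; exact isDesc_child_right i
        have hkL : ¬ isDesc (pvLargest arr n i) k := fun h => hk (isDesc_trans hdL h)
        rw [ih _ n _ k hkL, pvSwap_getD_other]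
        · intro h; exact hk (h ▸ isDesc_self i)
        · intro h; exact hk (h ▸ hdL)
    · rfl

theorem maxHeapify_bound : ∀ (fuel : Nat) (arr : List Int) (n i : Nat) (B : Int),
    n ≤ arr.length → i < n →
    (∀ j, j < n → isDesc i j → arr.getD j 0 ≤ B) →
    ∀ j, j < n → isDesc i j → (maxHeapify fuel arr n i).getD j 0 ≤ B := by
  intro fuel
  induction fuel with
  | zero => intro arr n i B _ _ h j hj hd; exact h j hj hd
  | succ fuel ih =>
    intro arr n i B hn hi h j hj hd
    rw [maxHeapify]
    split
    · rename_i hne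
      obtain ⟨hsel, _, _⟩ := pvLargest_spec arr n i
      rcases hsel with hcontra | ⟨hc, hLn, _⟩
      · exact absurd hcontra hne
      · set L := pvLargest arr n i with hLdef
        have hdL : isDesc i L := by
          rcases hc with h' | h'
          · rw [h']; exact isDesc_child_left i
          · rw [h']; exact isDesc_child_right i
        have hswapb : ∀ k, k < n → isDesc i k → (pvSwap arr i L).getD k 0 ≤ B := by
          intro k hk hdk
          by_cases hki : k = i
          · subst hki
            rw [pvSwap_getD_fst (by omega) (by omega)]
            exact h L hLn hdL
          · by_cases hkL : k = L
            · subst hkL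
              rw [pvSwap_getD_snd (by omega) (by omega)]
              exact h i hi (isDesc_self i)
            · rw [pvSwap_getD_other hki hkL]
              exact h k hk hdk
        by_cases hdLj : isDesc L j
        · exact ih _ n L B (by rw [pvSwap_length]; exact hn) hLn
            (fun k hk hdk => hswapb k hk (isDesc_trans hdL hdk)) j hj hdLj
        · rw [maxHeapify_outside _ _ _ _ _ hdLj]
          exact hswapb j hj hd
    · exact h j hj hd

-- the sift-down correctness: from an almost-heap at i to a heap on the subtree of i
theorem maxHeapify_sub : ∀ (fuel : Nat) (arr : List Int) (n i : Nat),
    n = arr.length → i < n → n - i ≤ fuel →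
    AlmostSub arr n i → EdgesOk (maxHeapify fuel arr n i) n i := by
  intro fuel
  induction fuel with
  | zero => intro arr n i hn hi hfuel hpre; omega
  | succ fuel ih =>
    intro arr n i hn hi hfuel hpre
    rw [maxHeapify]
    split
    · rename_i hne
      obtain ⟨hsel, hchl, hroot⟩ := pvLargest_spec arr n i
      rcases hsel with hcontra | ⟨hc, hLn, hlt⟩
      · exact absurd hcontra hne
      · set L := pvLargest arr n i with hLdef
        have hiL : i < L := by omega
        have hdL : isDesc i L := by
          rcases hc with h' | h'
          · rw [h']; exact isDesc_child_left i
          · rw [h']; exact isDesc_child_right i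
        set arr' := pvSwap arr i L with harr'
        have hlen' : arr'.length = arr.length := pvSwap_length arr i L
        -- values after the swap
        have hgi : arr'.getD i 0 = arr.getD L 0 := pvSwap_getD_fst (by omega) (by omega)
        have hgL : arr'.getD L 0 = arr.getD i 0 := pvSwap_getD_snd (by omega) (by omega)
        have hgo : ∀ k, k ≠ i → k ≠ L → arr'.getD k 0 = arr.getD k 0 :=
          fun k h1 h2 => pvSwap_getD_other h1 h2
        -- the recursive call's precondition: almost-heap at L
        have hpre' : AlmostSub arr' n L := by
          intro j h0 hjn hdp hpne
          have hple : L ≤ (j-1)/2 := isDesc_le hdp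
          have hpgt : L < (j-1)/2 := by omega
          have hjL : L < j := by omega
          rw [hgo j (by omega) (by omega), hgo ((j-1)/2) (by omega) (by omega)]
          exact hpre j h0 hjn (isDesc_trans hdL hdp) (by omega)
        set res := maxHeapify fuel arr' n L with hres
        have hsubL : EdgesOk res n L :=
          ih arr' n L (by omega) hLn (by omega) hpre'
        -- all old subtree-of-L values were ≤ arr[L] = the new root value
        have hML : ∀ k, k < n → isDesc L k → arr.getD k 0 ≤ arr.getD L 0 := by
          intro k hk hdk
          have hsubarrL : EdgesOk arr n L := by
            intro j h0 hjn hdp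
            have hple : L ≤ (j-1)/2 := isDesc_le hdp
            exact hpre j h0 hjn (isDesc_trans hdL hdp) (by omega)
          exact sub_max hsubarrL k hk hdk
        have hbnd : ∀ k, k < n → isDesc L k → res.getD k 0 ≤ arr.getD L 0 := by
          apply maxHeapify_bound fuel arr' n L (arr.getD L 0) (by omega) hLn
          intro k hk hdk
          by_cases hkL : k = L
          · subst hkL; rw [hgL]; omega
          · rw [hgo k (by have := isDesc_le hdk; omega) hkL]
            exact hML k hk hdk
        -- the root keeps the max value
        have hresi : res.getD i 0 = arr.getD L 0 := by
          rw [maxHeapify_outside fuel arr' n L i (fun h => by have := isDesc_le h; omega)]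
          exact hgi
        -- now prove every edge of the subtree of i
        intro j h0 hjn hdp
        set p := (j - 1) / 2 with hp
        by_cases hpi : p = i
        · -- an edge out of the root i itself; j is one of i's children
          have hji : j = 2*i + 1 ∨ j = 2*i + 2 := by omega
          rw [hpi, hresi]
          by_cases hjdL : isDesc L j
          · exact hbnd j hjn hjdL
          · have hjne : j ≠ L := fun h => hjdL (h ▸ isDesc_self L)
            rw [maxHeapify_outside fuel arr' n L j hjdL, hgo j (by omega) hjne]
            exact hchl j hji hjn
        · -- an edge with parent strictly inside; either inside subtree of L or untouched
          by_cases hpdL : isDesc L p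
          · exact hsubL j h0 hjn hpdL
          · have hjdL : ¬ isDesc L j := by
              intro hdj
              rcases isDesc_parent hdj (fun h => by have := isDesc_le hdL; omega) with ⟨_, hdp'⟩
              exact hpdL hdp'
            have hpne : p ≠ L := fun h => hpdL (h ▸ isDesc_self L)
            have hjne : j ≠ L := fun h => hjdL (h ▸ isDesc_self L)
            have hjni : j ≠ i := by
              have := isDesc_le hdp
              omega
            rw [maxHeapify_outside fuel arr' n L j hjdL,
                maxHeapify_outside fuel arr' n L p hpdL,
                hgo j hjni hjne, hgo p hpi hpne]
            exact hpre j h0 hjn hdp hpi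
    · -- no swap: arr[i] already ≥ both children
      rename_i hne
      have heq : pvLargest arr n i = i := by by_contra h; exact hne h
      obtain ⟨_, hchl, _⟩ := pvLargest_spec arr n i
      rw [heq] at hchl
      intro j h0 hjn hdp
      by_cases hpi : (j - 1) / 2 = i
      · rw [hpi]
        exact hchl j (by omega) hjn
      · exact hpre j h0 hjn hdp hpi

-- edges whose parent index is ≥ k all hold (build loop invariant)
def SubFrom (arr : List Int) (n k : Nat) : Prop :=
  ∀ j, 0 < j → j < n → k ≤ (j - 1) / 2 → arr.getD j 0 ≤ arr.getD ((j - 1) / 2) 0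

theorem build_fold : ∀ (k : Nat) (arr : List Int) (n : Nat), n = arr.length → k ≤ n / 2 →
    SubFrom arr n k →
    ((List.range k).reverse.foldl (fun a i => maxHeapify n a n i) arr).length = arr.length ∧
    ((List.range k).reverse.foldl (fun a i => maxHeapify n a n i) arr).Perm arr ∧
    SubFrom ((List.range k).reverse.foldl (fun a i => maxHeapify n a n i) arr) n 0 := by
  intro k
  induction k with
  | zero =>
    intro arr n hn _ hs
    exact ⟨rfl, List.Perm.refl arr, fun j h0 hjn _ => hs j h0 hjn (by omega)⟩
  | succ k ih =>
    intro arr n hn hk hs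
    have hrange : (List.range (k+1)).reverse
        = k :: (List.range k).reverse := by
      rw [List.range_succ, List.reverse_append]; rfl
    rw [hrange]
    simp only [List.foldl_cons]
    set a' := maxHeapify n arr n k with ha'
    have hkn : k < n := by omega
    have hpre : AlmostSub arr n k := by
      intro j h0 hjn hdp hpne
      have := isDesc_le hdp
      exact hs j h0 hjn (by omega)
    have hsub : EdgesOk a' n k :=
      maxHeapify_sub n arr n k hn hkn (by omega) hpre
    have hlen' : a'.length = arr.length := maxHeapify_length n arr n k
    have hperm' : a'.Perm arr := maxHeapify_perm n arr n k (by omega)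
    have hs' : SubFrom a' n k := by
      intro j h0 hjn hkp
      by_cases hdp : isDesc k ((j - 1) / 2)
      · exact hsub j h0 hjn hdp
      · have hdj : ¬ isDesc k j := by
          intro hdj
          have hne : j ≠ k := by omega
          exact hdp (isDesc_parent hdj hne).2
        have hpk : (j - 1) / 2 ≠ k := fun h => hdp (h ▸ isDesc_self k)
        rw [maxHeapify_outside n arr n k j hdj, maxHeapify_outside n arr n k _ hdp]
        exact hs j h0 hjn (by omega)
    obtain ⟨hl, hp, hsf⟩ := ih a' n (by omega) (by omega) hs'
    exact ⟨by rw [hl, hlen'], hp.trans hperm', hsf⟩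

theorem buildMaxHeap_spec (arr : List Int) :
    (buildMaxHeap arr).length = arr.length ∧ (buildMaxHeap arr).Perm arr ∧
    EdgesOk (buildMaxHeap arr) arr.length 0 := by
  have hvac : SubFrom arr arr.length (arr.length / 2) := by
    intro j h0 hjn hk
    omega
  obtain ⟨hl, hp, hs⟩ := build_fold (arr.length / 2) arr arr.length rfl (le_refl _) hvac
  exact ⟨hl, hp, fun j h0 hjn _ => hs j h0 hjn (by omega)⟩

-- basic getD facts used by the extract/loop lemmas
theorem getD_eq_getLast {l : List Int} (h : l ≠ []) :
    l.getD (l.length - 1) 0 = l.getLast h := by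
  rw [List.getLast_eq_getElem, List.getD_eq_getElem l 0 (by
    have := List.length_pos_iff.mpr h
    omega)]

theorem getD_dropLast {l : List Int} {j : Nat} (h : j < l.length - 1) :
    l.dropLast.getD j 0 = l.getD j 0 := by
  have hne : l ≠ [] := by
    intro hnil; subst hnil; simp at h
  conv_rhs => rw [← List.dropLast_append_getLast hne]
  rw [List.getD_append]
  simp [List.length_dropLast]
  omega

theorem dropLast_append_self {l : List Int} (h : l ≠ []) :
    l.dropLast ++ [l.getD (l.length - 1) 0] = l := by
  rw [getD_eq_getLast h]
  exact List.dropLast_append_getLast h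

theorem getD_mem {l : List Int} {k : Nat} (h : k < l.length) : l.getD k 0 ∈ l := by
  rw [List.getD_eq_getElem l 0 h]
  exact List.getElem_mem h

theorem mem_getD {l : List Int} {x : Int} (h : x ∈ l) :
    ∃ k, k < l.length ∧ l.getD k 0 = x := by
  obtain ⟨k, hk, he⟩ := List.mem_iff_getElem.mp h
  exact ⟨k, hk, by rw [List.getD_eq_getElem l 0 hk]; exact he⟩

-- heap_extract_max on a nonempty heap: returns the root (the max), one element fewer,
-- same elements, and the rest is again a heap
theorem extract_spec (T : List Int) (h0 : T ≠ []) (hh : EdgesOk T T.length 0) :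
    (heapExtractMax T).1 = T.getD 0 0 ∧
    (heapExtractMax T).2.length = T.length - 1 ∧
    T.Perm ((heapExtractMax T).1 :: (heapExtractMax T).2) ∧
    EdgesOk (heapExtractMax T).2 (T.length - 1) 0 := by
  have hn : 0 < T.length := List.length_pos_iff.mpr h0
  set n := T.length with hndef
  unfold heapExtractMax
  rw [if_neg (by omega)]
  simp only [← hndef]
  set a1 := pvSwap T 0 (n - 1) with ha1
  have hlen1 : a1.length = n := pvSwap_length T 0 (n-1)
  have hmv : a1.getD (n - 1) 0 = T.getD 0 0 := pvSwap_getD_snd (by omega) (by omega)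
  set a2 := a1.dropLast with ha2
  have hlen2 : a2.length = n - 1 := by rw [ha2, List.length_dropLast, hlen1]
  set res := maxHeapify a2.length a2 a2.length 0 with hres
  have hlenres : res.length = n - 1 := by rw [hres, maxHeapify_length, hlen2]
  have hpermres : res.Perm a2 := maxHeapify_perm _ a2 a2.length 0 (le_refl _)
  have ha1ne : a1 ≠ [] := by
    intro hnil
    rw [hnil] at hlen1
    simp at hlen1
    omega
  have hsplit : a2 ++ [T.getD 0 0] = a1 := by
    rw [ha2, ← hmv, ← hlen1]
    exact dropLast_append_self ha1ne
  refine ⟨hmv, hlenres, ?_, ?_⟩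
  · -- permutation
    rw [hmv]
    have h1 : T.Perm a1 := (pvSwap_perm (by omega) (by omega)).symm
    have h2 : a1.Perm (T.getD 0 0 :: a2) := by
      rw [← hsplit]
      exact List.perm_append_singleton _ _
    exact (h1.trans h2).trans (List.Perm.cons _ hpermres.symm)
  · -- remaining heap
    by_cases htriv : n - 1 = 0
    · intro j hj0 hjn _
      omega
    · have hpre2 : AlmostSub a2 a2.length 0 := by
        intro j hj0 hjn hdp hpne
        have hp1 : 1 ≤ (j - 1) / 2 := by omega
        rw [hlen2] at hjn
        rw [ha2, getD_dropLast (by omega), getD_dropLast (by omega)]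
        rw [ha1, pvSwap_getD_other (by omega) (by omega),
          pvSwap_getD_other (by omega) (by omega)]
        exact hh j hj0 (by omega) (isDesc_zero _)
      have := maxHeapify_sub a2.length a2 a2.length 0 rfl (by omega) (by omega) hpre2
      rw [← hres] at this
      intro j hj0 hjn hdp
      exact this j hj0 (by omega) hdp

-- A's while-loop posts the elements in descending order: it equals `eat` on any
-- descending rearrangement of the heap
theorem iceLoop_eq_eat : ∀ (fuel : Nat) (T L : List Int) (maxV minute : Int),
    T.length ≤ fuel → EdgesOk T T.length 0 → T.Perm L →
    L.Pairwise (fun a b => b ≤ a) →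
    iceLoop fuel T maxV minute = eat L maxV minute := by
  intro fuel
  induction fuel with
  | zero =>
    intro T L maxV minute hf hh hp hpw
    have hT : T = [] := List.length_eq_zero_iff.mp (by omega)
    subst hT
    have hL : L = [] := hp.symm.eq_nil
    subst hL
    rfl
  | succ fuel ih =>
    intro T L maxV minute hf hh hp hpw
    by_cases hTnil : T = []
    · subst hTnil
      have hL : L = [] := hp.symm.eq_nil
      subst hL
      rfl
    · have hn : 0 < T.length := List.length_pos_iff.mpr hTnil
      obtain ⟨hfst, hlen, hperm, hheap⟩ := extract_spec T hTnil hh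
      set m := T.getD 0 0 with hm
      -- L is nonempty and must start with the maximum m
      have hLne : L ≠ [] := by
        intro hnil
        subst hnil
        exact hTnil hp.eq_nil
      obtain ⟨c, tl, rfl⟩ := List.exists_cons_of_ne_nil hLne
      have hcm : c = m := by
        have hmem : m ∈ c :: tl := hp.mem_iff.mp (getD_mem hn)
        have hcmemT : c ∈ T := hp.mem_iff.mpr (List.mem_cons_self)
        obtain ⟨k, hk, hkeq⟩ := mem_getD hcmemT
        have hcle : c ≤ m := by
          rw [← hkeq, hm]
          exact sub_max hh k hk (isDesc_zero k)
        rcases List.mem_cons.mp hmem with h | h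
        · omega
        · have : m ≤ c := (List.pairwise_cons.mp hpw).1 m h
          omega
      subst hcm
      -- tails are a permutation pair
      have htl : (heapExtractMax T).2.Perm tl := by
        have := (hperm.symm.trans hp)
        rw [hfst] at this
        exact this.cons_inv
      have hheap' : EdgesOk (heapExtractMax T).2 (heapExtractMax T).2.length 0 := by
        rw [hlen]
        exact hheap
      have htllen : (heapExtractMax T).2.length ≤ fuel := by omega
      rw [iceLoop]
      rw [if_neg (by simp [hTnil])]
      simp only [hfst]
      rw [eat]
      split_ifs with hcmp
      · exact ih _ tl _ _ htllen hheap' htl (List.pairwise_cons.mp hpw).2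
      · exact ih _ tl _ _ htllen hheap' htl (List.pairwise_cons.mp hpw).2

-- B's while-loop pops from the back: it equals `eat` on the reversed list
theorem altLoop_eq_eat : ∀ (fuel : Nat) (S : List Int) (maxV minute : Int),
    S.length ≤ fuel → altLoop fuel S maxV minute = eat S.reverse maxV minute := by
  intro fuel
  induction fuel with
  | zero =>
    intro S maxV minute hf
    have hS : S = [] := List.length_eq_zero_iff.mp (by omega)
    subst hS
    rfl
  | succ fuel ih =>
    intro S maxV minute hf
    by_cases hS : S = []
    · subst hS; rfl
    · have hn : 0 < S.length := List.length_pos_iff.mpr hS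
      have hsplit : S.dropLast ++ [S.getD (S.length - 1) 0] = S := dropLast_append_self hS
      have hrev : S.reverse = S.getD (S.length - 1) 0 :: S.dropLast.reverse := by
        conv_lhs => rw [← hsplit]
        simp
      rw [altLoop]
      rw [if_neg (by simp [hS])]
      simp only []
      have hlen : S.dropLast.length ≤ fuel := by
        rw [List.length_dropLast]
        omega
      rw [hrev, eat]
      split_ifs with hcmp
      · exact ih _ _ _ hlen
      · exact ih _ _ _ hlen

-- ===== VERDICT (by name: the statement is the Claim_ definition above) =====
theorem ice_cream_2_spec : Claim_equal_ice_cream_2 := by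
  intro T _
  unfold Spec_ice_cream_2 ice_cream_2 ice_cream_2_alt
  simp only []
  obtain ⟨hbl, hbp, hbh⟩ := buildMaxHeap_spec T
  set S := PySem.List.sorted T (fun x => x) false with hS
  have hSperm : S.Perm T := PySem.List.sorted_perm T (fun x => x) false
  have hrevperm : S.reverse.Perm S := List.reverse_perm S
  have hpw : S.reverse.Pairwise (fun a b => b ≤ a) := by
    rw [List.pairwise_reverse]
    exact PySem.List.sorted_pairwise T (fun x => x)
  have hA : iceLoop (buildMaxHeap T).length (buildMaxHeap T) 0 0 = eat S.reverse 0 0 := by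
    apply iceLoop_eq_eat _ _ _ _ _ (le_refl _) (hbl ▸ hbh)
    · exact hbp.trans ((hrevperm.trans hSperm).symm)
    · exact hpw
  have hB : altLoop S.length S 0 0 = eat S.reverse 0 0 := altLoop_eq_eat _ _ _ _ (le_refl _)
  rw [hA, hB]
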